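-- pv_equiv track=rewrite | github.com/J110/dreamweaver-backend | scripts/generate_silly_songs_minimax.py | trim_lyrics
-- ===== SOURCE A (Python) =====
-- MAX_LYRICS_CHARS = 600
--
-- def trim_lyrics(lyrics: str) -> str:
--     """Trim lyrics to fit within MiniMax's 600-char limit.
--
--     Keeps complete sections (verse/chorus/bridge) that fit.
--     """
--     if len(lyrics) <= MAX_LYRICS_CHARS:
--         return lyrics
--
--     # Split into sections
--     sections = []
--     current = []
--     for line in lyrics.split("\n"):
--         if line.startswith("[") and current:
--             sections.append("\n".join(current))
--             current = [line]
--         else: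
--             current.append(line)
--     if current:
--         sections.append("\n".join(current))
--
--     # Build up lyrics keeping complete sections
--     result = []
--     total = 0
--     for section in sections:
--         new_total = total + len(section) + (1 if result else 0)  # +1 for newline between sections
--         if new_total <= MAX_LYRICS_CHARS:
--             result.append(section)
--             total = new_total
--         else:
--             break
--
--     return "\n".join(result)
-- ===== SOURCE B (Python) =====
-- MAX_LYRICS_CHARS = 600
--
-- def trim_lyrics(lyrics: str) -> str:
--     """Trim lyrics to fit within MiniMax's 600-char limit, single pass."""
--     if len(lyrics) <= MAX_LYRICS_CHARS:
--         return lyrics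
--     result = []
--     total = 0
--     current = []
--     stopped = False
--     for line in lyrics.split("\n"):
--         if line.startswith("[") and current:
--             if not stopped:
--                 section = "\n".join(current)
--                 new_total = total + len(section) + (1 if result else 0)
--                 if new_total <= MAX_LYRICS_CHARS:
--                     result.append(section)
--                     total = new_total
--                 else:
--                     stopped = True
--             current = [line]
--         else:
--             current.append(line)
--     if current and not stopped:
--         section = "\n".join(current)
--         new_total = total + len(section) + (1 if result else 0)
--         if new_total <= MAX_LYRICS_CHARS:
--             result.append(section)
--     return "\n".join(result)
-- ===== Notes on version B (the rewrite author's own statement) =====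
-- stated objective: simpler
-- what changed: Replaces A's two-phase structure (build a full sections list, then a second accumulation loop with break) by a single fused pass over the lines that finalizes and admits each section as it completes, with a stopped flag replacing break.
import Mathlib
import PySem

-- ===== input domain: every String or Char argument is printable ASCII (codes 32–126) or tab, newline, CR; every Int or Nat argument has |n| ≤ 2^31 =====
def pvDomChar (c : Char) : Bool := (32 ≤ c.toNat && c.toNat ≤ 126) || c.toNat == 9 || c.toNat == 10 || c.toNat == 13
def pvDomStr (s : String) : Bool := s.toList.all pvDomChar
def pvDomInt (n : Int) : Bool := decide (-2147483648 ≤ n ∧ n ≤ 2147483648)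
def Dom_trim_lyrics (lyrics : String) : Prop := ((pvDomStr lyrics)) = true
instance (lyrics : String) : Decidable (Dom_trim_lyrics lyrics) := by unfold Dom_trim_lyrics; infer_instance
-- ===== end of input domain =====

-- ===== PORT A =====
-- B is a single fused pass over the lines (no intermediate sections list), same return value; no side effects involved.
-- "\n".join(current) / sections
def pvJoinN (xs : List String) : String := PySem.Str.join "\n" xs

-- phase 1 of A: the 'for line in lyrics.split("\n")' loop building sections, plus the final 'if current' append
def pvSplitGo : List String → List String → List String
  | [], cur => if cur.isEmpty then [] else [pvJoinN cur]
  | l :: ls, cur =>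
      if PySem.Str.startswith l "[" ∧ ¬cur.isEmpty then
        pvJoinN cur :: pvSplitGo ls [l]
      else
        pvSplitGo ls (cur ++ [l])

-- phase 2 of A: the 'for section in sections' loop with break
def pvPickA : List String → List String → Int → List String
  | [], res, _ => res
  | s :: ss, res, tot =>
      let newTotal := tot + (PySem.Str.len s : Int) + (if res.isEmpty then 0 else 1)
      if newTotal ≤ 600 then pvPickA ss (res ++ [s]) newTotal else res

def trim_lyrics (lyrics : String) : String :=
  if (PySem.Str.len lyrics : Int) ≤ 600 then lyrics
  else
    let secs := pvSplitGo ((PySem.Str.split? lyrics "\n").getD []) []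
    pvJoinN (pvPickA secs [] 0)

-- ===== PORT B =====
-- B's single fused loop: state = (current lines, result, total, stopped)
def pvGoB : List String → List String → List String → Int → Bool → List String
  | [], cur, res, tot, stopped =>
      if ¬cur.isEmpty ∧ stopped = false then
        let sec := pvJoinN cur
        let newTotal := tot + (PySem.Str.len sec : Int) + (if res.isEmpty then 0 else 1)
        if newTotal ≤ 600 then res ++ [sec] else res
      else res
  | l :: ls, cur, res, tot, stopped =>
      if PySem.Str.startswith l "[" ∧ ¬cur.isEmpty then
        if stopped then pvGoB ls [l] res tot true
        else
          let sec := pvJoinN cur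
          let newTotal := tot + (PySem.Str.len sec : Int) + (if res.isEmpty then 0 else 1)
          if newTotal ≤ 600 then pvGoB ls [l] (res ++ [sec]) newTotal false
          else pvGoB ls [l] res tot true
      else pvGoB ls (cur ++ [l]) res tot stopped

def trim_lyrics_alt (lyrics : String) : String :=
  if (PySem.Str.len lyrics : Int) ≤ 600 then lyrics
  else pvJoinN (pvGoB ((PySem.Str.split? lyrics "\n").getD []) [] [] 0 false)

-- ===== PRECONDITION & SPEC =====
def Spec_trim_lyrics (lyrics : String) (out : String) : Prop := out = trim_lyrics_alt lyrics
instance (lyrics : String) (out : String) : Decidable (Spec_trim_lyrics lyrics out) := by unfold Spec_trim_lyrics; infer_instance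

-- ===== CLAIM (what is proved, stated in full; the proofs are below) =====
def Claim_equal_trim_lyrics : Prop := ∀ (lyrics : String), Dom_trim_lyrics lyrics → Spec_trim_lyrics lyrics (trim_lyrics lyrics)

-- ===== LEMMAS AND PROOFS =====
theorem pvGoB_stopped (ls : List String) : ∀ cur res tot, pvGoB ls cur res tot true = res := by
  induction ls with
  | nil => intro cur res tot; simp [pvGoB]
  | cons l ls ih =>
      intro cur res tot
      simp only [pvGoB]
      split
      · exact ih [l] res tot
      · exact ih (cur ++ [l]) res tot

theorem pvGoB_eq_pick (ls : List String) :
    ∀ cur res tot, pvGoB ls cur res tot false = pvPickA (pvSplitGo ls cur) res tot := by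
  induction ls with
  | nil =>
      intro cur res tot
      cases cur with
      | nil => simp [pvGoB, pvSplitGo, pvPickA]
      | cons c cs =>
          simp only [pvGoB, pvSplitGo, pvPickA, List.isEmpty_cons, Bool.false_eq_true,
            not_false_iff, and_true, if_true, if_false]
  | cons l ls ih =>
      intro cur res tot
      by_cases hh : PySem.Str.startswith l "[" ∧ ¬cur.isEmpty
      · simp only [pvGoB, pvSplitGo, if_pos hh, Bool.false_eq_true, if_false, pvPickA]
        split_ifs <;>
          first
          | exact ih [l] _ _
          | exact pvGoB_stopped ls [l] res tot
      · simp only [pvGoB, pvSplitGo, if_neg hh]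
        exact ih (cur ++ [l]) res tot

-- ===== VERDICT (by name: the statement is the Claim_ definition above) =====
theorem trim_lyrics_spec : Claim_equal_trim_lyrics := by
  intro lyrics _
  unfold Spec_trim_lyrics trim_lyrics trim_lyrics_alt
  simp only [pvGoB_eq_pick]
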